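-- pv_equiv track=rewrite | github.com/apache/allura | Allura/allura/model/repository.py | prefix_paths_union
-- ===== SOURCE A (Python) =====
-- def prefix_paths_union(a, b):
--     """
--     Given two sets of paths, a and b, find the items from a that
--     are either in b or are parent directories of items in b.
--     """
--     union = a & b
--     prefixes = a - b
--     candidates = b - a
--     for prefix in prefixes:
--         for candidate in candidates:
--             if candidate.startswith(prefix + '/'):
--                 union.add(prefix)
--                 break
--     return union
-- ===== SOURCE B (Python) =====
-- def prefix_paths_union(a, b):
--     """
--     Given two sets of paths, a and b, find the items from a that
--     are either in b or are parent directories of items in b.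
--     """
--     anc = set()
--     for c in b - a:
--         anc.update(c[:i] for i, ch in enumerate(c) if ch == '/')
--     return (a & b) | {p for p in a - b if p in anc}
-- ===== Notes on version B (the rewrite author's own statement) =====
-- stated objective: faster
-- what changed: Instead of scanning every candidate for every prefix (nested loops with startswith), B builds one hash set of all slash-cut ancestor prefixes of the candidates in b-a and answers each element of a-b with a single set lookup.
import Mathlib
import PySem

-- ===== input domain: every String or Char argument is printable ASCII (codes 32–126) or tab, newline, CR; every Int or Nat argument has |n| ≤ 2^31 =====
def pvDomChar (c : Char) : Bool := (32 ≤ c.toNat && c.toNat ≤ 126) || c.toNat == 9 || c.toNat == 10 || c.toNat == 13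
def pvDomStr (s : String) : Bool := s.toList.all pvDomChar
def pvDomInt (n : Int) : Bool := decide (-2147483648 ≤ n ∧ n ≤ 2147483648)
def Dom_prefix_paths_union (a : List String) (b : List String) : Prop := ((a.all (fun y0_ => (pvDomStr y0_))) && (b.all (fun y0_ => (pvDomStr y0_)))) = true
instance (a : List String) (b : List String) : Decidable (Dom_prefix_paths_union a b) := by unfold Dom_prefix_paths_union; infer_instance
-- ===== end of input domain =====

-- B replaces A's nested prefix×candidate scan by one pass that collects every
-- slash-cut ancestor prefix of the candidates into a set, then answers each
-- element of a-b with a single lookup.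

-- ===== PORT A =====
-- The parameters model Python sets (lists of distinct elements).
-- The inner 'for candidate in candidates: if …: add; break' adds `prefix` exactly
-- when SOME candidate matches, an order-independent effect, ported as `.any`.
def prefix_paths_union (a : List String) (b : List String) : List String :=
  let union := PySem.Set.inter a b
  let prefixes := PySem.Set.diff a b
  let candidates := PySem.Set.diff b a
  prefixes.foldl
    (fun u pfx =>
      if candidates.any (fun candidate => PySem.Str.startswith candidate (pfx ++ "/")) then
        PySem.Set.add u pfx
      else u)
    union

-- ===== PORT B =====
-- 'c[:i] for i, ch in enumerate(c) if ch == '/'' ; the slice c[:i] with the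
-- nonnegative enumerate index i is exactly take i (exact on this domain).
def pvAncestors (c : String) : List String :=
  (PySem.List.enumerate c.toList).filterMap
    (fun p => if p.2 = '/' then some (String.ofList (c.toList.take p.1.toNat)) else none)

def prefix_paths_union_alt (a : List String) (b : List String) : List String :=
  let anc := (PySem.Set.diff b a).foldl
    (fun s c => PySem.Set.update s (pvAncestors c)) PySem.Set.empty
  PySem.Set.union (PySem.Set.inter a b)
    ((PySem.Set.diff a b).filter (fun p => PySem.Set.contains anc p))

-- ===== PRECONDITION & SPEC =====
-- Both parameters are Python SETS; per the type convention they arrive as lists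
-- of DISTINCT elements, which is all Pre_ states (no other input is excluded).
def Pre_prefix_paths_union (a : List String) (b : List String) : Prop :=
  a.Nodup ∧ b.Nodup
instance (a : List String) (b : List String) : Decidable (Pre_prefix_paths_union a b) := by unfold Pre_prefix_paths_union; infer_instance

def pvWitness_prefix_paths_union : List String × List String :=
  (["src", "src/x", "doc"], ["src/x", "src/y/z"])

def Spec_prefix_paths_union (a : List String) (b : List String) (out : List String) : Prop := out = prefix_paths_union_alt a b
instance (a : List String) (b : List String) (out : List String) : Decidable (Spec_prefix_paths_union a b out) := by unfold Spec_prefix_paths_union; infer_instance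

-- ===== CLAIM (what is proved, stated in full; the proofs are below) =====
def Claim_equal_prefix_paths_union : Prop := ∀ (a : List String) (b : List String), Dom_prefix_paths_union a b → Pre_prefix_paths_union a b → Spec_prefix_paths_union a b (prefix_paths_union a b)

-- ===== LEMMAS AND PROOFS =====

-- A's conditional-add loop over a duplicate-free list of fresh elements is
-- "append the elements passing the test".
theorem pv_foldl_add_if {α : Type} [BEq α] [LawfulBEq α] (q : α → Bool) :
    ∀ (l : List α) (acc : List α), l.Nodup → (∀ x ∈ l, x ∉ acc) →
      l.foldl (fun u x => if q x then PySem.Set.add u x else u) acc = acc ++ l.filter q := by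
  intro l
  induction l with
  | nil => intro acc _ _; simp
  | cons x t ih =>
    intro acc hnd hdisj
    rw [List.nodup_cons] at hnd
    by_cases hq : q x = true
    · have hx : x ∉ acc := hdisj x (by simp)
      rw [List.foldl_cons, if_pos hq, PySem.Set.add_of_not_mem hx,
        List.filter_cons_of_pos hq]
      have hrec := ih (acc ++ [x]) hnd.2 (by
        intro y hy
        simp only [List.mem_append, List.mem_singleton]
        rintro (hmem | rfl)
        · exact hdisj y (by simp [hy]) hmem
        · exact hnd.1 hy)
      rw [hrec]
      simp
    · rw [List.foldl_cons, if_neg hq, List.filter_cons_of_neg hq]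
      exact ih acc hnd.2 (fun y hy => hdisj y (List.mem_cons_of_mem _ hy))

-- membership in the accumulated ancestor set
theorem pv_mem_foldl_update {α β : Type} [BEq α] [LawfulBEq α] (g : β → List α) :
    ∀ (l : List β) (s : PySem.Set α) (y : α),
      (y ∈ l.foldl (fun s c => PySem.Set.update s (g c)) s ↔ y ∈ s ∨ ∃ c ∈ l, y ∈ g c) := by
  intro l
  induction l with
  | nil => intro s y; simp
  | cons c t ih =>
    intro s y
    simp only [List.foldl_cons, ih, PySem.Set.mem_update, List.mem_cons]
    constructor
    · rintro ((h | h) | ⟨d, hd, hy⟩)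
      · exact Or.inl h
      · exact Or.inr ⟨c, Or.inl rfl, h⟩
      · exact Or.inr ⟨d, Or.inr hd, hy⟩
    · rintro (h | ⟨d, (rfl | hd), hy⟩)
      · exact Or.inl (Or.inl h)
      · exact Or.inl (Or.inr hy)
      · exact Or.inr ⟨d, hd, hy⟩

theorem pv_mem_enumerate {α : Type} :
    ∀ (cs : List α) (s : Int) (pr : Int × α),
      pr ∈ PySem.List.enumerate cs s ↔ ∃ k : Nat, ∃ h : k < cs.length, pr = (s + k, cs[k]) := by
  intro cs
  induction cs with
  | nil => intro s pr; simp [PySem.List.enumerate]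
  | cons x t ih =>
    intro s pr
    rw [PySem.List.enumerate_cons, List.mem_cons, ih]
    constructor
    · rintro (rfl | ⟨k, hk, rfl⟩)
      · refine ⟨0, by simp, ?_⟩
        simp
      · exact ⟨k + 1, by simpa using hk, by push_cast; simp [add_assoc, add_comm 1 (k : Int)]⟩
    · rintro ⟨k, hk, rfl⟩
      match k with
      | 0 => exact Or.inl (by simp)
      | k + 1 =>
        refine Or.inr ⟨k, by simpa using hk, ?_⟩
        push_cast
        simp [add_assoc, add_comm 1 (k : Int)]

-- c.startswith(p + '/')  ↔  p is a slash-cut prefix of c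
theorem pv_prefix_slash_iff (cs ps : List Char) :
    (ps ++ ['/']) <+: cs ↔ ∃ k : Nat, ∃ h : k < cs.length, cs[k] = '/' ∧ cs.take k = ps := by
  constructor
  · rintro ⟨t, ht⟩
    subst ht
    refine ⟨ps.length, by simp, ?_, ?_⟩
    · simp
    · rw [List.append_assoc, List.take_left]
  · rintro ⟨k, hk, hget, htake⟩
    have : cs.take (k + 1) = ps ++ ['/'] := by
      rw [List.take_add_one, htake]
      simp [List.getElem?_eq_getElem hk, hget]
    rw [← this]
    exact List.take_prefix _ _

theorem pv_mem_ancestors (c p : String) :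
    p ∈ pvAncestors c ↔ PySem.Str.startswith c (p ++ "/") = true := by
  rw [PySem.Str.startswith_eq, PySem.Chars.startswith_iff, String.toList_append]
  show _ ↔ (p.toList ++ ['/']) <+: c.toList
  rw [pv_prefix_slash_iff]
  unfold pvAncestors
  simp only [List.mem_filterMap]
  constructor
  · rintro ⟨pr, hpr, hsome⟩
    rw [pv_mem_enumerate] at hpr
    obtain ⟨k, hk, rfl⟩ := hpr
    by_cases hsl : c.toList[k] = '/'
    · refine ⟨k, hk, hsl, ?_⟩
      simp only [hsl, if_true] at hsome
      have h1 := congrArg String.toList (Option.some.inj hsome)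
      rw [String.toList_ofList] at h1
      simpa using h1
    · simp [hsl] at hsome
  · rintro ⟨k, hk, hsl, htake⟩
    refine ⟨((0 : Int) + k, c.toList[k]), ?_, ?_⟩
    · rw [pv_mem_enumerate]; exact ⟨k, hk, rfl⟩
    · have hs : String.ofList (c.toList.take k) = p := by
        apply String.ext
        rw [String.toList_ofList]
        exact htake
      simp [hsl, hs]

-- the two per-element tests agree
theorem pv_cond_eq (cands : List String) (p : String) :
    cands.any (fun candidate => PySem.Str.startswith candidate (p ++ "/")) =
      PySem.Set.contains
        (cands.foldl (fun s c => PySem.Set.update s (pvAncestors c)) PySem.Set.empty) p := by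
  by_cases h : ∃ c ∈ cands, PySem.Str.startswith c (p ++ "/") = true
  · rw [List.any_eq_true.mpr h]
    obtain ⟨c, hc, hs⟩ := h
    symm
    rw [PySem.Set.contains_iff, pv_mem_foldl_update]
    exact Or.inr ⟨c, hc, (pv_mem_ancestors c p).mpr hs⟩
  · have hfalse : cands.any (fun candidate => PySem.Str.startswith candidate (p ++ "/")) = false := by
      rw [List.any_eq_false]
      intro c hc hcs
      exact h ⟨c, hc, hcs⟩
    rw [hfalse]
    symm
    rw [← Bool.not_eq_true, PySem.Set.contains_iff, pv_mem_foldl_update]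
    rintro (hmem | ⟨c, hc, hanc⟩)
    · simp [PySem.Set.empty] at hmem
    · exact h ⟨c, hc, (pv_mem_ancestors c p).mp hanc⟩

-- ===== VERDICT (by name: the statement is the Claim_ definition above) =====
theorem prefix_paths_union_spec : Claim_equal_prefix_paths_union := by
  intro a b _ hpre
  unfold Spec_prefix_paths_union prefix_paths_union prefix_paths_union_alt
  simp only []
  have hdisj : ∀ x ∈ PySem.Set.diff a b, x ∉ PySem.Set.inter a b := by
    intro x hx hmem
    exact ((PySem.Set.mem_diff a b x).mp hx).2 ((PySem.Set.mem_inter a b x).mp hmem).2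
  have hnd : (PySem.Set.diff a b).Nodup := PySem.Set.nodup_diff a b hpre.1
  rw [pv_foldl_add_if _ _ _ hnd hdisj]
  have hfilters :
      (PySem.Set.diff a b).filter
          (fun pfx => (PySem.Set.diff b a).any
            (fun candidate => PySem.Str.startswith candidate (pfx ++ "/"))) =
        (PySem.Set.diff a b).filter
          (fun p => PySem.Set.contains
            ((PySem.Set.diff b a).foldl
              (fun s c => PySem.Set.update s (pvAncestors c)) PySem.Set.empty) p) := by
    apply List.filter_congr
    intro x _
    exact pv_cond_eq (PySem.Set.diff b a) x
  rw [hfilters]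
  rw [PySem.Set.union, PySem.Set.update_eq_append_of_disjoint]
  · exact List.Nodup.filter _ hnd
  · intro x hx
    exact hdisj x (List.mem_of_mem_filter hx)
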